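-- pv_equiv track=rewrite | github.com/Inkotake/ojo-agent | src/utils/text.py | samples_to_xml
-- ===== SOURCE A (Python) =====
-- def samples_to_xml(samples: list) -> str:
--     """将样例列表转换为XML格式字符串
--
--     Args:
--         samples: 样例列表，每个元素为 {"input": "...", "output": "..."}
--
--     Returns:
--         XML格式字符串，如 "<input>1 2</input><output>3</output>"
--     """
--     if not samples:
--         return ""
--
--     examples_parts = []
--     for sample in samples:
--         # 输入：strip 掉首尾空白（通常输入格式要求严格）
--         inp = sample.get("input", "").strip()
--         # 输出：只 strip 尾随空白，保留前导空白（字符串图案题需要前导空格）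
--         out = sample.get("output", "")
--         out_lines = out.split('\n')
--         # 去掉首尾的空白行
--         while out_lines and not out_lines[0].strip():
--             out_lines.pop(0)
--         while out_lines and not out_lines[-1].strip():
--             out_lines.pop()
--         # 每行只去掉尾随空白，保留前导空白
--         out_cleaned = '\n'.join(line.rstrip() for line in out_lines)
--         examples_parts.append(f"<input>{inp}</input>")
--         examples_parts.append(f"<output>{out_cleaned}</output>")
--     return "\n".join(examples_parts)
-- ===== SOURCE B (Python) =====
-- def samples_to_xml(samples: list) -> str:
--     """Same output as A: one joined block per sample; blank-line trimming done by
--     rstripping every line and stripping boundary newlines instead of list popping."""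
--     blocks = []
--     for sample in samples:
--         inp = sample.get("input", "").strip()
--         out = sample.get("output", "")
--         cleaned = '\n'.join(line.rstrip() for line in out.split('\n')).strip('\n')
--         blocks.append(f"<input>{inp}</input>\n<output>{cleaned}</output>")
--     return "\n".join(blocks)
-- ===== Notes on version B (the rewrite author's own statement) =====
-- stated objective: simpler
-- what changed: Replaced the two destructive while-pop loops that trim boundary blank lines with a single expression (rstrip every line, rejoin, strip boundary newlines), and emit one joined block per sample instead of two list entries.
import Mathlib
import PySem

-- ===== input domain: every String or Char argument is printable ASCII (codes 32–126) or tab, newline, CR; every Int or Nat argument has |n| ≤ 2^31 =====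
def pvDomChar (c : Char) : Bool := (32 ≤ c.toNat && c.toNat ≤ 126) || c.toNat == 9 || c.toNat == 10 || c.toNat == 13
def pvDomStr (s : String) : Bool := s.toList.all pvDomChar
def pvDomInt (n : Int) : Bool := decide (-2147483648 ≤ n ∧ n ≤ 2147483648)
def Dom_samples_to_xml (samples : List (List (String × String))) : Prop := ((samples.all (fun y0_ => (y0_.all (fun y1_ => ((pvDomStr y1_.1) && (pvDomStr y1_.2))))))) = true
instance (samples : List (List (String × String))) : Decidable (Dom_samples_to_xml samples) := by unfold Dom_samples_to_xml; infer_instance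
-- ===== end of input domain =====

-- B replaces A's two destructive while-pop loops (trimming boundary blank lines) by
-- rstripping every line, rejoining and stripping boundary newlines, and emits one joined
-- block per sample instead of two list entries; return values proved equal on Dom.

-- shared helper: out.split('\n')  (sep ≠ "", so split? is always `some`)
def strSplitNl (s : String) : List String := (PySem.Str.split? s "\n").getD []

-- ===== PORT A =====
-- while out_lines and not out_lines[0].strip(): out_lines.pop(0)
def pvDropLeadBlank : List String → List String
  | [] => []
  | l :: rest => if PySem.Str.strip l = "" then pvDropLeadBlank rest else l :: rest

-- while out_lines and not out_lines[-1].strip(): out_lines.pop()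
-- (repeatedly popping the last blank element = the same loop on the reversed list)
def pvDropTrailBlank (lines : List String) : List String :=
  (pvDropLeadBlank lines.reverse).reverse

def samples_to_xml (samples : List (List (String × String))) : String :=
  if samples = [] then "" else
  let parts := samples.foldl (fun acc sample =>
      let inp := PySem.Str.strip ((PySem.Dict.mk sample).getD "input" "")
      let out := (PySem.Dict.mk sample).getD "output" ""
      let out_lines := pvDropTrailBlank (pvDropLeadBlank (strSplitNl out))
      let out_cleaned := PySem.Str.join "\n" (out_lines.map PySem.Str.rstrip)
      acc ++ ["<input>" ++ inp ++ "</input>", "<output>" ++ out_cleaned ++ "</output>"]) []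
  PySem.Str.join "\n" parts

-- ===== PORT B =====
def samples_to_xml_alt (samples : List (List (String × String))) : String :=
  PySem.Str.join "\n" (samples.map (fun sample =>
    let inp := PySem.Str.strip ((PySem.Dict.mk sample).getD "input" "")
    let out := (PySem.Dict.mk sample).getD "output" ""
    let cleaned := PySem.Str.stripChars
        (PySem.Str.join "\n" ((strSplitNl out).map PySem.Str.rstrip)) "\n"
    "<input>" ++ inp ++ "</input>\n<output>" ++ cleaned ++ "</output>"))

-- ===== PRECONDITION & SPEC =====
def Spec_samples_to_xml (samples : List (List (String × String))) (out : String) : Prop := out = samples_to_xml_alt samples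
instance (samples : List (List (String × String))) (out : String) : Decidable (Spec_samples_to_xml samples out) := by unfold Spec_samples_to_xml; infer_instance

-- ===== CLAIM (what is proved, stated in full; the proofs are below) =====
def Claim_equal_samples_to_xml : Prop := ∀ (samples : List (List (String × String))), Dom_samples_to_xml samples → Spec_samples_to_xml samples (samples_to_xml samples)

-- ===== LEMMAS AND PROOFS =====

-- blank-line tests: l.strip() == '' ↔ l.rstrip() == '' ↔ l is all whitespace
theorem rstrip_eq_nil_iff (p : List Char) :
    PySem.Chars.rstrip p = [] ↔ ∀ c ∈ p, PySem.Chars.isspace c = true := by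
  simp [PySem.Chars.rstrip, List.dropWhile_eq_nil_iff]

theorem mem_rstrip {c : Char} {p : List Char} (h : c ∈ PySem.Chars.rstrip p) : c ∈ p := by
  rw [PySem.Chars.rstrip, List.mem_reverse] at h
  exact List.mem_reverse.mp ((List.dropWhile_sublist _).subset h)

theorem strip_eq_nil_iff (p : List Char) :
    PySem.Chars.strip p = [] ↔ ∀ c ∈ p, PySem.Chars.isspace c = true := by
  rw [PySem.Chars.strip, rstrip_eq_nil_iff]
  constructor
  · intro h c hc
    by_cases hs : PySem.Chars.isspace c = true
    · exact hs
    · have : c ∈ PySem.Chars.lstrip p := by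
        rw [PySem.Chars.lstrip]
        have hsplit := List.takeWhile_append_dropWhile (p := PySem.Chars.isspace) (l := p)
        rcases List.mem_append.mp (by rw [hsplit]; exact hc) with h1 | h2
        · exact absurd (List.mem_takeWhile_imp h1) hs
        · exact h2
      exact h c this
  · intro h c hc
    rw [PySem.Chars.lstrip] at hc
    exact h c ((List.dropWhile_sublist _).subset hc)

theorem ofList_eq_empty_iff (cs : List Char) : String.ofList cs = "" ↔ cs = [] := by
  constructor
  · intro h; have := congrArg String.toList h; simpa using this
  · intro h; simp [h]

-- the while-pop loops are dropWhile / rdropWhile on the list of lines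
theorem dropLead_eq (ls : List String) :
    pvDropLeadBlank ls = List.dropWhile (fun l => PySem.Str.strip l == "") ls := by
  induction ls with
  | nil => rfl
  | cons l rest ih =>
    rw [pvDropLeadBlank, List.dropWhile_cons]
    by_cases h : PySem.Str.strip l = ""
    · simp [h, ih]
    · simp [h]

theorem dropTrail_eq (ls : List String) :
    pvDropTrailBlank ls = List.rdropWhile (fun l => PySem.Str.strip l == "") ls := by
  rw [pvDropTrailBlank, dropLead_eq, List.rdropWhile]

-- 'line.strip() == ""' and 'line.rstrip() == []' test the same thing
theorem blank_pred_eq :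
    (fun l : String => PySem.Str.strip l == "")
      = (fun l : String => PySem.Chars.rstrip l.toList == []) := by
  funext l
  have h1 : (PySem.Str.strip l = "") ↔ PySem.Chars.rstrip l.toList = [] := by
    rw [PySem.Str.strip, ofList_eq_empty_iff, strip_eq_nil_iff, rstrip_eq_nil_iff]
  by_cases h : PySem.Str.strip l = ""
  · simp [h, h1.mp h]
  · have h2 : PySem.Chars.rstrip l.toList ≠ [] := fun hc => h (h1.mpr hc)
    rw [Bool.eq_iff_iff]
    simp [List.isEmpty_iff, h, h2]

-- Chars.join: appending one more part, and reversing a join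
theorem join_append_singleton (sep y : List Char) :
    ∀ (xs : List (List Char)), xs ≠ [] →
    PySem.Chars.join sep (xs ++ [y]) = PySem.Chars.join sep xs ++ sep ++ y
  | [], h => absurd rfl h
  | [x], _ => by
      rw [List.singleton_append, PySem.Chars.join_cons_cons, PySem.Chars.join_singleton,
        PySem.Chars.join_singleton]
  | x :: x' :: t, _ => by
      have ih := join_append_singleton sep y (x' :: t) (by simp)
      have h1 : (x :: x' :: t) ++ [y] = x :: x' :: (t ++ [y]) := by simp
      rw [h1, PySem.Chars.join_cons_cons, PySem.Chars.join_cons_cons]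
      have h3 : (x' :: t) ++ [y] = x' :: (t ++ [y]) := by simp
      rw [h3] at ih
      rw [ih]
      simp [List.append_assoc]

theorem join_reverse (parts : List (List Char)) :
    (PySem.Chars.join ['\n'] parts).reverse
      = PySem.Chars.join ['\n'] ((parts.map List.reverse).reverse) := by
  induction parts with
  | nil => simp [PySem.Chars.join_nil]
  | cons p ps ih =>
    cases ps with
    | nil => simp [PySem.Chars.join_singleton]
    | cons q rest =>
      rw [PySem.Chars.join_cons_cons, List.map_cons, List.reverse_cons,
        join_append_singleton _ _ _ (by simp), ← ih]
      simp

-- dropping leading '\n' of a join = dropping leading empty parts (parts contain no '\n')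
theorem join_dropWhile (parts : List (List Char)) (h : ∀ p ∈ parts, ('\n' : Char) ∉ p) :
    List.dropWhile (fun c => List.contains ['\n'] c) (PySem.Chars.join ['\n'] parts)
      = PySem.Chars.join ['\n'] (List.dropWhile (fun p => p == []) parts) := by
  induction parts with
  | nil => simp [PySem.Chars.join_nil]
  | cons p ps ih =>
    match p, ps with
    | [], [] => simp [PySem.Chars.join_singleton, PySem.Chars.join_nil]
    | [], q :: rest =>
      rw [PySem.Chars.join_cons_cons]
      have hrec := ih (fun p hp => h p (List.mem_cons_of_mem _ hp))
      simp only [List.nil_append, List.singleton_append, List.dropWhile_cons_of_pos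
        (by simp : (fun c => List.contains ['\n'] c) '\n' = true)] at hrec ⊢
      rw [hrec]
      simp [List.dropWhile]
    | c :: cs, ps =>
      have hc : c ≠ '\n' := fun hceq => (h (c :: cs) (by simp)) (hceq ▸ List.mem_cons_self)
      have hhead : ∃ t, PySem.Chars.join ['\n'] ((c :: cs) :: ps) = c :: t := by
        cases ps with
        | nil => exact ⟨cs, by rw [PySem.Chars.join_singleton]⟩
        | cons q rest => exact ⟨cs ++ '\n' :: PySem.Chars.join ['\n'] (q :: rest), by
            rw [PySem.Chars.join_cons_cons]; simp⟩
      obtain ⟨t, ht⟩ := hhead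
      rw [ht, List.dropWhile_cons_of_neg (by simp [hc]), ← ht]
      simp [List.dropWhile]

-- stripping boundary '\n' of a join = trimming boundary empty parts
theorem mainChars (parts : List (List Char)) (h : ∀ p ∈ parts, ('\n' : Char) ∉ p) :
    PySem.Chars.stripChars (PySem.Chars.join ['\n'] parts) ['\n']
      = PySem.Chars.join ['\n']
          (List.rdropWhile (fun p => p == []) (List.dropWhile (fun p => p == []) parts)) := by
  rw [PySem.Chars.stripChars]
  set q := List.dropWhile (fun p : List Char => p == []) parts with hq
  have hqmem : ∀ p ∈ q, ('\n' : Char) ∉ p :=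
    fun p hp => h p ((List.dropWhile_sublist _).subset hp)
  rw [join_dropWhile parts h, ← hq, join_reverse]
  have hrevmem : ∀ p ∈ (q.map List.reverse).reverse, ('\n' : Char) ∉ p := by
    intro p hp
    rw [List.mem_reverse, List.mem_map] at hp
    obtain ⟨r, hr, rfl⟩ := hp
    simpa using hqmem r hr
  rw [join_dropWhile _ hrevmem]
  have hcomm : List.dropWhile (fun p : List Char => p == []) ((q.map List.reverse).reverse)
      = (List.dropWhile (fun p : List Char => p == []) q.reverse).map List.reverse := by
    rw [← List.map_reverse, List.dropWhile_map]
    have hfun : ((fun p : List Char => p == []) ∘ List.reverse) = (fun p : List Char => p == []) := by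
      funext x; simp [Function.comp]
    rw [hfun]
  rw [hcomm, join_reverse, List.rdropWhile]
  simp [List.map_map]

-- the pieces of out.split('\n') contain no '\n'
theorem go_no_nl : ∀ (fuel : Nat) (l cur : List Char) (acc : List (List Char)),
    l.length < fuel → ('\n' : Char) ∉ cur → (∀ p ∈ acc, ('\n' : Char) ∉ p) →
    ∀ p ∈ PySem.Chars.splitOn.go ['\n'] fuel l cur acc, ('\n' : Char) ∉ p
  | 0, l, cur, acc, hf, _, _ => absurd hf (by omega)
  | fuel + 1, [], cur, acc, _, hcur, hacc => by
      rw [PySem.Chars.splitOn.go.eq_2 _ _ _ _ (by omega)]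
      intro p hp
      rw [List.mem_reverse] at hp
      rcases List.mem_cons.mp hp with rfl | hp
      · simpa using hcur
      · exact hacc p hp
  | fuel + 1, c :: rest, cur, acc, hf, hcur, hacc => by
      rw [PySem.Chars.splitOn.go.eq_3]
      by_cases hpre : List.isPrefixOf ['\n'] (c :: rest) = true
      · rw [if_pos hpre]
        refine go_no_nl fuel _ [] _ ?_ (by simp) ?_
        · simp at hf ⊢; omega
        · intro p hp
          rcases List.mem_cons.mp hp with rfl | hp
          · simpa using hcur
          · exact hacc p hp
      · rw [if_neg hpre]
        have hc : c ≠ '\n' := by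
          intro rfl_c
          apply hpre
          simp [List.isPrefixOf, rfl_c]
        refine go_no_nl fuel rest (c :: cur) acc ?_ ?_ hacc
        · simp at hf ⊢; omega
        · intro hmem
          rcases List.mem_cons.mp hmem with h | h
          · exact hc h.symm
          · exact hcur h

theorem splitNl_no_nl (s : String) :
    ∀ l ∈ strSplitNl s, ('\n' : Char) ∉ l.toList := by
  intro l hl
  have hnl : ("\n" : String).toList = ['\n'] := by decide
  rw [strSplitNl, PySem.Str.split?, PySem.Chars.split?, hnl] at hl
  rw [if_neg (by simp)] at hl
  simp only [Option.map_some, Option.getD_some, List.mem_map] at hl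
  obtain ⟨q, hq, rfl⟩ := hl
  have hgo := go_no_nl (s.toList.length + 1) s.toList [] [] (by omega) (by simp) (by simp)
  rw [PySem.Chars.splitOn] at hq
  simpa using hgo _ hq

-- the per-sample equality: B's one-expression cleaning = A's pop-loop cleaning
theorem perSample (lines : List String) (hn : ∀ l ∈ lines, ('\n' : Char) ∉ l.toList) :
    PySem.Str.stripChars (PySem.Str.join "\n" (lines.map PySem.Str.rstrip)) "\n"
      = PySem.Str.join "\n" ((pvDropTrailBlank (pvDropLeadBlank lines)).map PySem.Str.rstrip) := by
  have hnl : ("\n" : String).toList = ['\n'] := by decide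
  rw [PySem.Str.stripChars]
  conv_rhs => rw [PySem.Str.join]
  apply congrArg String.ofList
  rw [PySem.Str.toList_join, hnl]
  rw [List.map_map, List.map_map]
  show PySem.Chars.stripChars
      (PySem.Chars.join ['\n'] (lines.map (String.toList ∘ PySem.Str.rstrip))) ['\n']
    = PySem.Chars.join ['\n']
      ((pvDropTrailBlank (pvDropLeadBlank lines)).map (String.toList ∘ PySem.Str.rstrip))
  have hgcomp : (String.toList ∘ PySem.Str.rstrip)
      = (fun l : String => PySem.Chars.rstrip l.toList) := by
    funext l; exact PySem.Str.toList_rstrip l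
  rw [hgcomp]
  set g : String → List Char := fun l => PySem.Chars.rstrip l.toList with hgdef
  have hmem : ∀ p ∈ lines.map g, ('\n' : Char) ∉ p := by
    intro p hp
    rw [List.mem_map] at hp
    obtain ⟨l, hl, rfl⟩ := hp
    exact fun hin => hn l hl (mem_rstrip hin)
  rw [mainChars _ hmem]
  -- commute map g with the two trims
  have hb : (fun l : String => PySem.Str.strip l == "")
      = ((fun p : List Char => p == []) ∘ g) := by
    rw [blank_pred_eq]; rfl
  rw [dropLead_eq, dropTrail_eq, hb]
  rw [List.rdropWhile, List.rdropWhile]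
  congr 1
  simp only [← List.dropWhile_map, List.map_reverse]

-- proof-only shorthands for the per-sample pieces
def pvInp (sample : List (String × String)) : String :=
  PySem.Str.strip ((PySem.Dict.mk sample).getD "input" "")
def pvOut (sample : List (String × String)) : String :=
  (PySem.Dict.mk sample).getD "output" ""
def pvCleanA (sample : List (String × String)) : String :=
  PySem.Str.join "\n" ((pvDropTrailBlank (pvDropLeadBlank (strSplitNl (pvOut sample)))).map PySem.Str.rstrip)
def pvCleanB (sample : List (String × String)) : String :=
  PySem.Str.stripChars (PySem.Str.join "\n" ((strSplitNl (pvOut sample)).map PySem.Str.rstrip)) "\n"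

theorem cleanB_eq_cleanA (sample : List (String × String)) :
    pvCleanB sample = pvCleanA sample :=
  perSample (strSplitNl (pvOut sample)) (splitNl_no_nl (pvOut sample))

def pvPartsFn (s : List (String × String)) : List String :=
  ["<input>" ++ pvInp s ++ "</input>", "<output>" ++ pvCleanA s ++ "</output>"]

theorem A_eq (samples : List (List (String × String))) :
    samples_to_xml samples = if samples = [] then "" else
      PySem.Str.join "\n" (samples.flatMap pvPartsFn) := by
  rw [samples_to_xml]
  by_cases h : samples = []
  · rw [if_pos h, if_pos h]
  · rw [if_neg h, if_neg h]
    have hfold := PySem.List.foldl_append_eq_flatMap pvPartsFn samples []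
    rw [List.nil_append] at hfold
    show PySem.Str.join "\n" (List.foldl (fun acc x => acc ++ pvPartsFn x) [] samples)
      = PySem.Str.join "\n" (List.flatMap pvPartsFn samples)
    exact congrArg _ hfold

-- interleaving the two parts of each sample then joining = joining the pre-joined blocks
theorem pairJoin : ∀ (l : List (List Char × List Char)),
    PySem.Chars.join ['\n'] (l.flatMap (fun p => [p.1, p.2]))
      = PySem.Chars.join ['\n'] (l.map (fun p => p.1 ++ '\n' :: p.2))
  | [] => rfl
  | [p] => by
      simp only [List.flatMap_cons, List.flatMap_nil, List.append_nil, List.map_cons, List.map_nil]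
      rw [PySem.Chars.join_cons_cons, PySem.Chars.join_singleton, PySem.Chars.join_singleton]
      simp
  | p :: q :: m => by
      have ih := pairJoin (q :: m)
      simp only [List.flatMap_cons, List.map_cons, List.cons_append, List.nil_append] at ih ⊢
      rw [PySem.Chars.join_cons_cons, PySem.Chars.join_cons_cons, ih,
        PySem.Chars.join_cons_cons]
      simp [List.append_assoc]

theorem mapFlat_eq (samples : List (List (String × String))) :
    List.map String.toList (samples.flatMap pvPartsFn)
      = (samples.map (fun s => (("<input>" ++ pvInp s ++ "</input>").toList,
          ("<output>" ++ pvCleanA s ++ "</output>").toList))).flatMap (fun p => [p.1, p.2]) := by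
  induction samples with
  | nil => rfl
  | cons a t iht =>
      simp only [List.flatMap_cons, List.map_append, List.map_cons, List.map_nil,
        pvPartsFn, iht]

-- ===== VERDICT (by name: the statement is the Claim_ definition above) =====
theorem samples_to_xml_spec : Claim_equal_samples_to_xml := by
  intro samples _
  show samples_to_xml samples = samples_to_xml_alt samples
  rw [A_eq, samples_to_xml_alt]
  by_cases h : samples = []
  · rw [if_pos h, h]; rfl
  · rw [if_neg h]
    have hB : (fun sample : List (String × String) =>
        "<input>" ++ pvInp sample ++ "</input>\n<output>" ++ pvCleanB sample ++ "</output>")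
        = (fun sample => "<input>" ++ pvInp sample ++ "</input>\n<output>" ++ pvCleanA sample ++ "</output>") := by
      funext sample; rw [cleanB_eq_cleanA]
    rw [show samples.map (fun sample =>
        let inp := PySem.Str.strip ((PySem.Dict.mk sample).getD "input" "")
        let out := (PySem.Dict.mk sample).getD "output" ""
        let cleaned := PySem.Str.stripChars
            (PySem.Str.join "\n" ((strSplitNl out).map PySem.Str.rstrip)) "\n"
        "<input>" ++ inp ++ "</input>\n<output>" ++ cleaned ++ "</output>")
      = samples.map (fun sample =>
        "<input>" ++ pvInp sample ++ "</input>\n<output>" ++ pvCleanB sample ++ "</output>") from rfl]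
    rw [hB]
    rw [PySem.Str.join, PySem.Str.join]
    apply congrArg String.ofList
    have hnl : ("\n" : String).toList = ['\n'] := by decide
    rw [hnl]
    have hlit : ("</input>\n<output>" : String).toList
        = "</input>".toList ++ '\n' :: "<output>".toList := by decide
    rw [mapFlat_eq, pairJoin, List.map_map, List.map_map]
    apply congrArg
    apply List.map_congr_left
    intro s _
    simp only [Function.comp, String.toList_append, hlit]
    simp [List.append_assoc]
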